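-- pv_equiv track=rewrite | github.com/adebali/NGStoolkit | bin/utils/pipeTools.py | funIn2out
-- ===== SOURCE A (Python) =====
-- def getExtension(fileName):
--     return fileName.strip().split('.')[-1]
--
-- def replaceLast(source_string, replace_what, replace_with):
--     head, sep, tail = source_string.rpartition(replace_what)
--     return head + replace_with + tail
--
-- def in2out(input, oldExtension, newExtension):
--     if input.endswith(oldExtension):
--         output = replaceLast(input, oldExtension, newExtension)
--     else:
--         output = input + '.' + getExtension(newExtension)
--     return output
--
-- def funIn2out(functionName, input, extraWord = '', abbreviationLength = 3):
--     fl = functionName.split('_')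
--     method = fl[0]
--     extensions = fl[1]
--     if extensions.count('2') != 1:
--         raise ValueError('2 must be used and it has to be used only once. Eg: functionName_fa2csv')
--     el = extensions.split('2')
--     extensionIn = el[0]
--     extensionOut = el[1]
--     string = ''
--     start = True
--     for letter in fl[0]:
--         if letter.isupper() or start == True:
--             wordStart = 1
--             string += letter
--         elif wordStart < abbreviationLength:
--             string += letter
--             wordStart += 1
--         start = False
--     string += extraWord
--     return in2out(input, '.' + extensionIn, '.' + string + '.' + extensionOut)
-- ===== SOURCE B (Python) =====
-- def getExtension(fileName):
--     return fileName.strip().split('.')[-1]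
--
-- def replaceLast(source_string, replace_what, replace_with):
--     head, sep, tail = source_string.rpartition(replace_what)
--     return head + replace_with + tail
--
-- def in2out(input, oldExtension, newExtension):
--     if input.endswith(oldExtension):
--         output = replaceLast(input, oldExtension, newExtension)
--     else:
--         output = input + '.' + getExtension(newExtension)
--     return output
--
-- def funIn2out(functionName, input, extraWord = '', abbreviationLength = 3):
--     fl = functionName.split('_')
--     method = fl[0]
--     extensions = fl[1]
--     if extensions.count('2') != 1:
--         raise ValueError('2 must be used and it has to be used only once. Eg: functionName_fa2csv')
--     el = extensions.split('2')
--     extensionIn = el[0]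
--     extensionOut = el[1]
--     # segment method into words: each word starts at the first char or at an uppercase letter
--     words = []
--     rest = method
--     while rest:
--         k = 1
--         while k < len(rest) and not rest[k].isupper():
--             k += 1
--         words.append(rest[:k])
--         rest = rest[k:]
--     n = max(1, abbreviationLength)
--     string = ''.join(w[:n] for w in words) + extraWord
--     return in2out(input, '.' + extensionIn, '.' + string + '.' + extensionOut)
-- ===== Notes on version B (the rewrite author's own statement) =====
-- stated objective: alternative
-- what changed: The abbreviation is built by first segmenting the method name into words at uppercase letters and then joining each word's first max(1, abbreviationLength) characters, replacing A's single pass with a running start-flag and per-word character counter.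
import Mathlib
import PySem

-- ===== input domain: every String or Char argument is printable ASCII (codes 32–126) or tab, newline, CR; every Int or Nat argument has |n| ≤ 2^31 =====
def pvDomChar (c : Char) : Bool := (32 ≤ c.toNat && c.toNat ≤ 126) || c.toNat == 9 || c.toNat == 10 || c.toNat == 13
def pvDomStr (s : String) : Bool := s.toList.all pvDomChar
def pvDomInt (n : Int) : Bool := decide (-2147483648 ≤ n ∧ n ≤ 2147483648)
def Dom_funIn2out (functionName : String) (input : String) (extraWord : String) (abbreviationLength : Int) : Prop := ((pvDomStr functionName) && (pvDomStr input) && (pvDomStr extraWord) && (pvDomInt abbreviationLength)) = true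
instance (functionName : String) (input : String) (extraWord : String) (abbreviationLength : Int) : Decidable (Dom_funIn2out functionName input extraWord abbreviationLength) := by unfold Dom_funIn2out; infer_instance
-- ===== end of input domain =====

-- B replaces A's running-counter character loop by a segment-then-slice decomposition
-- (cut the method into words at uppercase letters, then join the first max(1,len) chars of each word);
-- the extension parsing and in2out/replaceLast logic is kept identical (objective: alternative decomposition).

-- ===== PORT A =====
-- shared helpers (identical source code in Source A and Source B): getExtension, replaceLast, in2out
-- getExtension: fileName.strip().split('.')[-1]  (split('.') is never empty, so [-1] never raises)
def pvGetExtension (fileName : List Char) : List Char :=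
  PySem.List.pyGetD (PySem.Chars.splitOn (PySem.Chars.strip fileName) ['.']) (-1) []

-- replaceLast via rpartition: PySem has no rpartition, so it is ported by hand with rfind
-- (exact for nonempty replace_what, the only way it is called: rpartition splits at the LAST occurrence,
--  and on no occurrence returns ('', '', source), i.e. replace_with ++ source).
def pvReplaceLast (src what repl : List Char) : List Char :=
  let i := PySem.Chars.rfind src what
  if i < 0 then repl ++ src
  else src.take i.toNat ++ repl ++ src.drop (i.toNat + what.length)

def pvIn2out (input old new : List Char) : List Char :=
  if PySem.Chars.endswith input old then pvReplaceLast input old new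
  else input ++ '.' :: pvGetExtension new

-- A's loop body over state (string, start, wordStart)
def pvStepA (L : Int) (st : List Char × Bool × Int) (c : Char) : List Char × Bool × Int :=
  if PySem.Chars.isupper c || st.2.1 then (st.1 ++ [c], false, 1)
  else if st.2.2 < L then (st.1 ++ [c], false, st.2.2 + 1)
  else (st.1, false, st.2.2)

def funIn2out (functionName : String) (input : String) (extraWord : String) (abbreviationLength : Int) : String :=
  let fl := PySem.Chars.splitOn functionName.toList ['_']
  let method := PySem.List.pyGetD fl 0 []
  let extensions := PySem.List.pyGetD fl 1 []   -- IndexError when functionName has no '_' (excluded by Pre_)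
  if PySem.Chars.count extensions ['2'] ≠ 1 then ""   -- ValueError in Python (excluded by Pre_)
  else
    let el := PySem.Chars.splitOn extensions ['2']
    let extensionIn := PySem.List.pyGetD el 0 []
    let extensionOut := PySem.List.pyGetD el 1 []
    let st := method.foldl (pvStepA abbreviationLength) ([], true, 1)
    let s := st.1 ++ extraWord.toList
    String.ofList (pvIn2out input.toList ('.' :: extensionIn) ('.' :: s ++ '.' :: extensionOut))

-- ===== PORT B =====
-- Source B's outer while over 'rest': rest[:k] with the inner while is takeWhile/dropWhile of the non-uppercase run
def pvWords (cs : List Char) : List (List Char) :=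
  match cs with
  | [] => []
  | c :: cs' =>
      (c :: cs'.takeWhile (fun d => !PySem.Chars.isupper d)) ::
        pvWords (cs'.dropWhile (fun d => !PySem.Chars.isupper d))
termination_by cs.length
decreasing_by simpa using Nat.lt_succ_of_le (List.length_dropWhile_le _ _)

def funIn2out_alt (functionName : String) (input : String) (extraWord : String) (abbreviationLength : Int) : String :=
  let fl := PySem.Chars.splitOn functionName.toList ['_']
  let method := PySem.List.pyGetD fl 0 []
  let extensions := PySem.List.pyGetD fl 1 []   -- IndexError when functionName has no '_' (excluded by Pre_)
  if PySem.Chars.count extensions ['2'] ≠ 1 then ""   -- ValueError in Python (excluded by Pre_)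
  else
    let el := PySem.Chars.splitOn extensions ['2']
    let extensionIn := PySem.List.pyGetD el 0 []
    let extensionOut := PySem.List.pyGetD el 1 []
    let n := max 1 abbreviationLength          -- w[:n] with n ≥ 1 is List.take n
    let s := ((pvWords method).map (fun w => w.take n.toNat)).flatten ++ extraWord.toList
    String.ofList (pvIn2out input.toList ('.' :: extensionIn) ('.' :: s ++ '.' :: extensionOut))

-- ===== PRECONDITION & SPEC =====
-- Pre_ excludes exactly the inputs where Python A raises: no '_' in functionName (IndexError on fl[1])
-- or fl[1] not containing exactly one '2' (explicit ValueError). A returns on every other input.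
def Pre_funIn2out (functionName : String) (input : String) (extraWord : String) (abbreviationLength : Int) : Prop :=
  2 ≤ (PySem.Chars.splitOn functionName.toList ['_']).length ∧
  PySem.Chars.count (PySem.List.pyGetD (PySem.Chars.splitOn functionName.toList ['_']) 1 []) ['2'] = 1
instance (functionName : String) (input : String) (extraWord : String) (abbreviationLength : Int) : Decidable (Pre_funIn2out functionName input extraWord abbreviationLength) := by unfold Pre_funIn2out; infer_instance

def pvWitness_funIn2out : String × String × String × Int := ("fastaToCsv_fa2csv", "reads.fa", "", 3)

def Spec_funIn2out (functionName : String) (input : String) (extraWord : String) (abbreviationLength : Int) (out : String) : Prop := out = funIn2out_alt functionName input extraWord abbreviationLength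
instance (functionName : String) (input : String) (extraWord : String) (abbreviationLength : Int) (out : String) : Decidable (Spec_funIn2out functionName input extraWord abbreviationLength out) := by unfold Spec_funIn2out; infer_instance

-- ===== CLAIM (what is proved, stated in full; the proofs are below) =====
def Claim_equal_funIn2out : Prop := ∀ (functionName : String) (input : String) (extraWord : String) (abbreviationLength : Int), Dom_funIn2out functionName input extraWord abbreviationLength → Pre_funIn2out functionName input extraWord abbreviationLength → Spec_funIn2out functionName input extraWord abbreviationLength (funIn2out functionName input extraWord abbreviationLength)

-- ===== LEMMAS AND PROOFS =====

-- the accumulated string factors out of A's fold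
theorem pvFoldA_acc (L : Int) (cs : List Char) (s : List Char) (b : Bool) (w : Int) :
    (cs.foldl (pvStepA L) (s, b, w)).1 = s ++ (cs.foldl (pvStepA L) ([], b, w)).1 := by
  induction cs generalizing s b w with
  | nil => simp
  | cons c cs ih =>
      simp only [List.foldl_cons, pvStepA, List.nil_append]
      split
      · rw [ih (s ++ [c]), ih [c]]; simp
      · split
        · rw [ih (s ++ [c]), ih [c]]; simp
        · exact ih s false w

-- at a word boundary (empty rest or uppercase head) the counter is irrelevant
theorem pvFoldA_boundary (L : Int) (cs : List Char)
    (h : cs = [] ∨ ∃ d cs', cs = d :: cs' ∧ PySem.Chars.isupper d = true) (w w' : Int) :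
    (cs.foldl (pvStepA L) ([], false, w)).1 = (cs.foldl (pvStepA L) ([], false, w')).1 := by
  rcases h with h | ⟨d, cs', rfl, hd⟩
  · simp [h]
  · simp [pvStepA, hd]

-- a run of non-uppercase letters contributes its first (L - w)⁺ characters
theorem pvFoldA_run (L : Int) (lw : List Char) (cs : List Char) (w : Int)
    (hlw : ∀ c ∈ lw, PySem.Chars.isupper c = false)
    (hcs : cs = [] ∨ ∃ d cs', cs = d :: cs' ∧ PySem.Chars.isupper d = true) :
    ((lw ++ cs).foldl (pvStepA L) ([], false, w)).1 =
      lw.take (L - w).toNat ++ (cs.foldl (pvStepA L) ([], false, 1)).1 := by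
  induction lw generalizing w with
  | nil => simpa using pvFoldA_boundary L cs hcs w 1
  | cons c lw ih =>
      have hc := hlw c (by simp)
      have hlw' : ∀ x ∈ lw, PySem.Chars.isupper x = false := fun x hx => hlw x (by simp [hx])
      rw [List.cons_append, List.foldl_cons]
      by_cases hw : w < L
      · have hstate : pvStepA L ([], false, w) c = ([c], false, w + 1) := by
          simp [pvStepA, hc, hw]
        have h1 : (L - w).toNat = (L - (w + 1)).toNat + 1 := by omega
        rw [hstate, pvFoldA_acc, ih (w + 1) hlw', h1]
        simp
      · have hstate : pvStepA L ([], false, w) c = ([], false, w) := by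
          simp [pvStepA, hc, hw]
        have h0 : (L - w).toNat = 0 := by omega
        rw [hstate, ih w hlw', h0]
        simp

-- main: A's running-counter loop computes B's segment-then-slice string
theorem pvFoldA_eq_words (L : Int) (cs : List Char) :
    (cs.foldl (pvStepA L) ([], true, 1)).1 =
      ((pvWords cs).map (fun w => w.take (max 1 L).toNat)).flatten := by
  induction cs using pvWords.induct with
  | case1 => simp [pvWords]
  | case2 c cs' ih =>
      set p : Char → Bool := fun d => !PySem.Chars.isupper d with hp
      have hsplit : cs' = cs'.takeWhile p ++ cs'.dropWhile p := (List.takeWhile_append_dropWhile).symm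
      have htw : ∀ x ∈ cs'.takeWhile p, PySem.Chars.isupper x = false := by
        intro x hx
        have := List.mem_takeWhile_imp hx
        simpa [hp] using this
      have hbd : cs'.dropWhile p = [] ∨
          ∃ d ds, cs'.dropWhile p = d :: ds ∧ PySem.Chars.isupper d = true := by
        rcases hdw : cs'.dropWhile p with _ | ⟨d, ds⟩
        · exact Or.inl rfl
        · refine Or.inr ⟨d, ds, rfl, ?_⟩
          have hne : cs'.dropWhile p ≠ [] := by simp [hdw]
          have h2 := List.head_dropWhile_not (p := p) (l := cs') hne
          have h3 : p d = false := by simpa [hdw] using h2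
          simpa [hp] using h3
      -- first step of A's loop (start = true)
      have hstep : ((c :: cs').foldl (pvStepA L) ([], true, 1)).1 =
          [c] ++ (cs'.foldl (pvStepA L) ([], false, 1)).1 := by
        simp only [List.foldl_cons, pvStepA, Bool.or_true, if_true]
        exact pvFoldA_acc L cs' [c] false 1
      -- the tail after the boundary restarts like a fresh string
      have hrest : ((cs'.dropWhile p).foldl (pvStepA L) ([], false, 1)).1 =
          ((cs'.dropWhile p).foldl (pvStepA L) ([], true, 1)).1 := by
        rcases hbd with h | ⟨d, ds, hdw, hd⟩
        · simp [h]
        · simp [hdw, pvStepA, hd]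
      have hrun := pvFoldA_run L (cs'.takeWhile p) (cs'.dropWhile p) 1 htw hbd
      have htk : (c :: cs'.takeWhile p).take (max 1 L).toNat =
          c :: (cs'.takeWhile p).take (L - 1).toNat := by
        have h1 : (max 1 L).toNat = (L - 1).toNat + 1 := by omega
        simp [h1]
      calc ((c :: cs').foldl (pvStepA L) ([], true, 1)).1
          = [c] ++ (cs'.foldl (pvStepA L) ([], false, 1)).1 := hstep
        _ = [c] ++ ((cs'.takeWhile p ++ cs'.dropWhile p).foldl (pvStepA L) ([], false, 1)).1 := by
              rw [← hsplit]
        _ = [c] ++ ((cs'.takeWhile p).take (L - 1).toNat ++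
              ((cs'.dropWhile p).foldl (pvStepA L) ([], false, 1)).1) := by rw [hrun]
        _ = [c] ++ ((cs'.takeWhile p).take (L - 1).toNat ++
              ((pvWords (cs'.dropWhile p)).map (fun w => w.take (max 1 L).toNat)).flatten) := by
              rw [hrest, ih]
        _ = ((pvWords (c :: cs')).map (fun w => w.take (max 1 L).toNat)).flatten := by
              conv_rhs => rw [pvWords]
              simp only [← hp, List.map_cons, List.flatten_cons, htk]
              simp

-- ===== VERDICT (by name: the statement is the Claim_ definition above) =====
theorem funIn2out_spec : Claim_equal_funIn2out := by
  intro functionName input extraWord abbreviationLength _ _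
  unfold Spec_funIn2out funIn2out funIn2out_alt
  simp only [pvFoldA_eq_words]
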